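-- pv_equiv track=rewrite | github.com/nickleefly/leetcode | bankTransfer.py | solution
-- ===== SOURCE A (Python) =====
-- def solution(R, V):
--     minimal_A, minimal_B, balance = 0, 0, 0
--     for receiver, amount in zip(R, V):
--         if receiver == 'A':
--             balance += amount
--             minimal_B = min(-balance, minimal_B)
--         else:
--             balance -= amount
--             minimal_A = min(balance, minimal_A)
--
--     return [-minimal_A, -minimal_B]
-- ===== SOURCE B (Python) =====
-- def solution(R, V):
--     # Explicit prefix-balance sequence, then two filtered max scans.
--     steps = []
--     bal = 0
--     for r, v in zip(R, V):
--         bal += v if r == 'A' else -v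
--         steps.append((r, bal))
--     a = max([0] + [-b for r, b in steps if r != 'A'])
--     b = max([0] + [b for r, b in steps if r == 'A'])
--     return [a, b]
-- ===== Notes on version B (the rewrite author's own statement) =====
-- stated objective: alternative
-- what changed: Replaces the interleaved running-minima updates with an explicitly materialized signed prefix-balance list followed by two filtered max scans (one per account), using the identity -min(xs,0)=max(-xs,0).
import Mathlib
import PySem

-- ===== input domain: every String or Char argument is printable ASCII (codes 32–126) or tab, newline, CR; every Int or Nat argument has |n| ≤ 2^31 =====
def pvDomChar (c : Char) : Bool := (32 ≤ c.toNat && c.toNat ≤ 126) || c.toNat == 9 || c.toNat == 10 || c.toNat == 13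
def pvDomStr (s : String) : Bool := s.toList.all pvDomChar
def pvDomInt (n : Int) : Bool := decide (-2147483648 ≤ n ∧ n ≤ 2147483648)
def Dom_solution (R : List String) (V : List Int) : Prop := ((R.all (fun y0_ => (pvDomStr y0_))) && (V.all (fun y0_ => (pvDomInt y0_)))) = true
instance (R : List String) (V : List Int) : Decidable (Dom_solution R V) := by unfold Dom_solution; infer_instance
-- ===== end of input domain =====

-- B replaces A's interleaved running-minima loop by an explicit signed prefix-balance list plus two filtered max scans (alternative decomposition, same cost).


-- ===== PORT A =====
-- A's loop body: state (minimal_A, minimal_B, balance)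
def stepA (st : Int × Int × Int) (p : String × Int) : Int × Int × Int :=
  if p.1 == "A" then (st.1, min (-(st.2.2 + p.2)) st.2.1, st.2.2 + p.2)
  else (min (st.2.2 - p.2) st.1, st.2.1, st.2.2 - p.2)

def solution (R : List String) (V : List Int) : List Int :=
  let s := (List.zip R V).foldl stepA (0, 0, 0)
  [-s.1, -s.2.1]

-- ===== PORT B =====
-- Source B's loop building the (receiver, running signed balance) list
def stepsB : List (String × Int) → Int → List (String × Int)
  | [], _ => []
  | (r, v) :: t, bal =>
      let b' := bal + (if r == "A" then v else -v)
      (r, b') :: stepsB t b'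

def solution_alt (R : List String) (V : List Int) : List Int :=
  let steps := stepsB (List.zip R V) 0
  -- max([0] + xs) ported as xs.foldl max 0 (exact: both are the max of 0 and xs)
  let a := ((steps.filter (fun p => !(p.1 == "A"))).map (fun p => -p.2)).foldl max 0
  let b := ((steps.filter (fun p => p.1 == "A")).map (fun p => p.2)).foldl max 0
  [a, b]

-- ===== PRECONDITION & SPEC =====
def Spec_solution (R : List String) (V : List Int) (out : List Int) : Prop := out = solution_alt R V
instance (R : List String) (V : List Int) (out : List Int) : Decidable (Spec_solution R V out) := by unfold Spec_solution; infer_instance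

-- ===== CLAIM (what is proved, stated in full; the proofs are below) =====
def Claim_equal_solution : Prop := ∀ (R : List String) (V : List Int), Dom_solution R V → Spec_solution R V (solution R V)

-- ===== LEMMAS AND PROOFS =====

-- last running balance of A's loop
def lastBal : List (String × Int) → Int → Int
  | [], bal => bal
  | (r, v) :: t, bal => lastBal t (bal + (if r == "A" then v else -v))

-- invariant: A's fold computes the two running minima over B's prefix-balance list
theorem foldA_eq (l : List (String × Int)) :
    ∀ (mA mB bal : Int),
      l.foldl stepA (mA, mB, bal) =
        ( (((stepsB l bal).filter (fun p => !(p.1 == "A"))).map (fun p => p.2)).foldl (fun a x => min x a) mA,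
          (((stepsB l bal).filter (fun p => p.1 == "A")).map (fun p => -p.2)).foldl (fun a x => min x a) mB,
          lastBal l bal ) := by
  induction l with
  | nil => intro mA mB bal; simp [stepsB, lastBal]
  | cons hd t ih =>
      intro mA mB bal
      obtain ⟨r, v⟩ := hd
      by_cases h : r == "A" <;>
        simp [stepsB, lastBal, stepA, h, List.foldl_cons, sub_eq_add_neg, ih]

-- negating a running min gives a running max of negations
theorem neg_foldl_min (xs : List Int) : ∀ (a : Int),
    -(xs.foldl (fun a x => min x a) a) = (xs.map (fun x => -x)).foldl max (-a) := by
  induction xs with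
  | nil => intro a; simp
  | cons x t ih =>
      intro a
      simp only [List.foldl_cons, List.map_cons, ih]
      congr 1
      rcases le_total x a with h | h <;> simp [h]

theorem solution_spec : Claim_equal_solution := by
  intro R V _
  unfold Spec_solution solution solution_alt
  rw [foldA_eq]
  simp only [neg_foldl_min, neg_zero, List.map_map]
  simp [Function.comp_def]

-- ===== VERDICT (by name: the statement is the Claim_ definition above) =====
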